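-- pv_equiv track=rewrite | github.com/imewei/homodyne-analysis | homodyne/tests/test_cli_method_validation.py | _extract_method_help
-- ===== SOURCE A (Python) =====
-- def _extract_method_help(help_text: str) -> str:
--     """Extract the method argument help section."""
--     lines = help_text.split('\n')
--     method_section = []
--     in_method_section = False
--
--     for line in lines:
--         if '--method' in line and '{classical' in line:
--             in_method_section = True
--         if in_method_section:
--             method_section.append(line)
--             if line.strip() and not line.startswith(' ') and len(method_section) > 1:
--                 break
--
--     return '\n'.join(method_section)
-- ===== SOURCE B (Python) =====
-- def _extract_method_help(help_text: str) -> str: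
--     """Extract the method argument help section."""
--     lines = help_text.split('\n')
--     start = next((i for i, line in enumerate(lines)
--                   if '--method' in line and '{classical' in line), None)
--     if start is None:
--         return ''
--     end = next((j + 1 for j in range(start + 1, len(lines))
--                 if lines[j].strip() and not lines[j].startswith(' ')), len(lines))
--     return '\n'.join(lines[start:end])
-- ===== Notes on version B (the rewrite author's own statement) =====
-- stated objective: simpler
-- what changed: A's single flag-driven accumulation loop with a break is replaced by two index searches and one slice: find the first line containing both markers, then the first later non-indented non-blank line, and join that slice (e.g. on '--method {classical}\n help text\nEnd of section' both return the whole section).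
import Mathlib
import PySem

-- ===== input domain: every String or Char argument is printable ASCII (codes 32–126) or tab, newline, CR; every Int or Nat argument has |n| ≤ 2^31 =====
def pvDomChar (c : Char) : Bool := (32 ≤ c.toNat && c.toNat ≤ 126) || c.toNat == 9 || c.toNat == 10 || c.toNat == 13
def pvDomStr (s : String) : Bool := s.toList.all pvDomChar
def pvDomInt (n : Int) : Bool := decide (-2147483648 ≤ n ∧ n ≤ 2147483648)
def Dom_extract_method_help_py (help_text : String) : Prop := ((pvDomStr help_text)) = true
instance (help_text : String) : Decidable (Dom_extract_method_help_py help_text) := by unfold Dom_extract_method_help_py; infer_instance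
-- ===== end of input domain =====

-- B replaces A's flag-driven accumulation loop by two index searches and a slice (objective: simpler decomposition, same cost).

-- ===== PORT A =====
-- the flag-driven accumulation loop of A, with break → returning the accumulator
def pvGoA (lines : List String) (acc : List String) (inSec : Bool) : List String :=
  match lines with
  | [] => acc
  | line :: rest =>
    let inSec' := if PySem.Str.isIn "--method" line && PySem.Str.isIn "{classical" line then true else inSec
    if inSec' then
      let acc' := acc ++ [line]
      if !(PySem.Str.strip line == "") && !(PySem.Str.startswith line " ") && decide (acc'.length > 1) then
        acc'
      else pvGoA rest acc' inSec'
    else pvGoA rest acc inSec'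

def extract_method_help_py (help_text : String) : String :=
  PySem.Str.join "\n" (pvGoA (((PySem.Str.split? help_text "\n").getD [])) [] false)

-- ===== PORT B =====
def extract_method_help_py_alt (help_text : String) : String :=
  let lines := (PySem.Str.split? help_text "\n").getD []
  match List.findIdx? (fun line => PySem.Str.isIn "--method" line && PySem.Str.isIn "{classical" line) lines with
  | none => ""
  | some start =>
    let endIdx :=
      match List.findIdx? (fun line => !(PySem.Str.strip line == "") && !(PySem.Str.startswith line " "))
              (lines.drop (start + 1)) with
      | none => lines.length
      | some j => start + 1 + j + 1
    PySem.Str.join "\n" ((lines.drop start).take (endIdx - start))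

-- ===== PRECONDITION & SPEC =====
def Spec_extract_method_help_py (help_text : String) (out : String) : Prop := out = extract_method_help_py_alt help_text
instance (help_text : String) (out : String) : Decidable (Spec_extract_method_help_py help_text out) := by unfold Spec_extract_method_help_py; infer_instance

-- ===== CLAIM (what is proved, stated in full; the proofs are below) =====
def Claim_equal_extract_method_help_py : Prop := ∀ (help_text : String), Dom_extract_method_help_py help_text → Spec_extract_method_help_py help_text (extract_method_help_py help_text)

-- ===== LEMMAS AND PROOFS =====

-- abbreviations for the two tests, used only by the proofs
def pvTrig (line : String) : Bool := PySem.Str.isIn "--method" line && PySem.Str.isIn "{classical" line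
def pvStop (line : String) : Bool := !(PySem.Str.strip line == "") && !(PySem.Str.startswith line " ")

-- inclusive take-until, the list A's phase-2 loop collects after the trigger line
def pvCollect (lines : List String) : List String :=
  match lines with
  | [] => []
  | l :: rest => if pvStop l then [l] else l :: pvCollect rest

theorem pvGoA_true (lines : List String) (acc : List String) (hacc : acc ≠ []) :
    pvGoA lines acc true = acc ++ pvCollect lines := by
  induction lines generalizing acc with
  | nil => simp [pvGoA, pvCollect]
  | cons l rest ih =>
    have hlen : 0 < acc.length := by
      cases acc with
      | nil => exact absurd rfl hacc
      | cons a t => simp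
    unfold pvGoA pvCollect
    by_cases ha : PySem.Str.strip l = "" <;>
      cases hb : PySem.Chars.startswith l.toList [' '] <;>
        simp [pvStop, ha, hb, hlen, ih (acc ++ [l]) (by simp)]

theorem pvCollect_none (lines : List String)
    (h : List.findIdx? pvStop lines = none) : pvCollect lines = lines := by
  induction lines with
  | nil => rfl
  | cons l rest ih =>
    rw [List.findIdx?_cons] at h
    cases hs : pvStop l with
    | true => rw [hs] at h; simp at h
    | false =>
      rw [hs] at h
      simp only [Bool.false_eq_true, if_false, Option.map_eq_none_iff] at h
      simp [pvCollect, hs, ih h]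

theorem pvCollect_some (lines : List String) (j : Nat)
    (h : List.findIdx? pvStop lines = some j) : pvCollect lines = lines.take (j + 1) := by
  induction lines generalizing j with
  | nil => simp at h
  | cons l rest ih =>
    rw [List.findIdx?_cons] at h
    cases hs : pvStop l with
    | true =>
      rw [hs] at h
      simp only [if_true, Option.some.injEq] at h
      subst h
      simp [pvCollect, hs]
    | false =>
      rw [hs] at h
      simp only [Bool.false_eq_true, if_false, Option.map_eq_some_iff] at h
      obtain ⟨j', hj', rfl⟩ := h
      simp [pvCollect, hs, ih j' hj']

theorem pvGoA_eq (lines : List String) :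
    pvGoA lines [] false =
      match List.findIdx? pvTrig lines with
      | none => []
      | some i => lines.getD i "" :: pvCollect (lines.drop (i + 1)) := by
  induction lines with
  | nil => rfl
  | cons l rest ih =>
    rw [List.findIdx?_cons]
    cases htr : pvTrig l with
    | true =>
      -- trigger line: appended, cannot break (length = 1), then phase 2
      unfold pvGoA
      simp only [pvTrig] at htr
      simp only [htr]
      simp [pvGoA_true rest [l] (by simp)]
    | false =>
      have step : pvGoA (l :: rest) [] false = pvGoA rest [] false := by
        conv_lhs => unfold pvGoA
        simp only [pvTrig] at htr
        rw [htr]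
        rfl
      rw [step, ih]
      cases h : List.findIdx? pvTrig rest with
      | none => simp
      | some i => simp

theorem core_eq (lines : List String) :
    pvGoA lines [] false =
      match List.findIdx? pvTrig lines with
      | none => []
      | some start =>
        (lines.drop start).take
          ((match List.findIdx? pvStop (lines.drop (start + 1)) with
            | none => lines.length
            | some j => start + 1 + j + 1) - start) := by
  rw [pvGoA_eq]
  cases h : List.findIdx? pvTrig lines with
  | none => rfl
  | some start =>
    have hlt : start < lines.length := by
      have := List.findIdx?_eq_some_iff_findIdx_eq.mp h
      exact this.1
    have hdrop : lines.drop start = lines.getD start "" :: lines.drop (start + 1) := by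
      rw [List.getD_eq_getElem lines "" hlt]
      exact (List.getElem_cons_drop hlt).symm
    cases hs : List.findIdx? pvStop (lines.drop (start + 1)) with
    | none =>
      simp only [hs]
      rw [pvCollect_none _ hs, hdrop]
      have h1 : lines.length - start = (lines.length - (start + 1)) + 1 := by omega
      rw [h1, List.take_succ_cons, ← List.length_drop, List.take_length]
    | some j =>
      simp only [hs]
      have h1 : start + 1 + j + 1 - start = (j + 1) + 1 := by omega
      rw [h1, hdrop, List.take_succ_cons, pvCollect_some _ j hs]

-- ===== VERDICT (by name: the statement is the Claim_ definition above) =====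
theorem extract_method_help_py_spec : Claim_equal_extract_method_help_py := by
  intro help_text _
  unfold Spec_extract_method_help_py extract_method_help_py extract_method_help_py_alt
  have hc := core_eq ((PySem.Str.split? help_text "\n").getD [])
  have e1 : pvTrig = (fun line => PySem.Str.isIn "--method" line && PySem.Str.isIn "{classical" line) := rfl
  have e2 : pvStop = (fun line => !(PySem.Str.strip line == "") && !(PySem.Str.startswith line " ")) := rfl
  rw [e1, e2] at hc
  rw [hc]
  cases h : List.findIdx? (fun line => PySem.Str.isIn "--method" line && PySem.Str.isIn "{classical" line) ((PySem.Str.split? help_text "\n").getD []) with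
  | none =>
    simp only [h]
    rfl
  | some start =>
    simp only [h]
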